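-- pv_equiv track=rewrite | github.com/dnanto/prototype-rex | rex/btop.py | mutations
-- ===== SOURCE A (Python) =====
-- def mutations(btop):
-- 	pos, digis, chars = 0, [], []
-- 	for ele in btop:
-- 		if ele.isdigit():
-- 			digis.append(ele)
-- 		else:
-- 			chars.append(ele)
-- 		if chars and len(chars) % 2 == 0:
-- 			if digis:
-- 				pos += int("".join(digis))
-- 				digis = []
-- 			pos += 1
-- 			yield (*chars, pos)
-- 			chars = []
-- ===== SOURCE B (Python) =====
-- def mutations(btop):
--     # Recursive-style tokenizer: repeatedly split off "leading digits + one
--     # non-digit char", twice per mutation; digits from both runs concatenate.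
--     # The index j points at the not-yet-consumed suffix of s.
--     s = list(btop)
--
--     def split_one(start):
--         for i in range(start, len(s)):
--             if not s[i].isdigit():
--                 return s[start:i], s[i], i + 1
--         return None
--
--     pos = 0
--     j = 0
--     while True:
--         r1 = split_one(j)
--         if r1 is None:
--             return
--         d1, c1, j = r1
--         r2 = split_one(j)
--         if r2 is None:
--             return
--         d2, c2, j = r2
--         num = "".join(d1) + "".join(d2)
--         pos += (int(num) if num else 0) + 1
--         yield (c1, c2, pos)
-- ===== Notes on version B (the rewrite author's own statement) =====
-- stated objective: alternative
-- what changed: Replaced A's single-pass character state machine (digit/char accumulator lists with an even-length check) by a recursive tokenizer that repeatedly splits off a leading digit run plus one non-digit character, twice per yielded mutation, concatenating both digit runs before converting to int.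
import Mathlib
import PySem

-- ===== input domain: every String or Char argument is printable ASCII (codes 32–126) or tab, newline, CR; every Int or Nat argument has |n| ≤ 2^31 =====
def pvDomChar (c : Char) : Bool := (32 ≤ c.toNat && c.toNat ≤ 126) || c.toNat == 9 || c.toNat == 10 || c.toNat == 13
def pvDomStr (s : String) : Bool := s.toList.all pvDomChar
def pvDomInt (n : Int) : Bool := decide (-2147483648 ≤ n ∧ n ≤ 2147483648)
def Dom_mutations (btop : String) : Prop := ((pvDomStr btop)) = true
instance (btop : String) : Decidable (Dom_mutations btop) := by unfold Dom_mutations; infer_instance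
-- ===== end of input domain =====

-- B replaces A's one-pass state machine (digit/char accumulators with a parity check) by a
-- recursive tokenizer that repeatedly splits off "leading digits + one non-digit char" twice per
-- mutation; same results, a different decomposition (objective: alternative).
-- Both versions are generators in Python; their yielded sequences are compared as lists.

-- ===== PORT A =====
-- one iteration of A's for-loop, on the state (pos, digis, chars, out)
def mutStep (st : Int × List Char × List Char × List (String × String × Int)) (ele : Char) :
    Int × List Char × List Char × List (String × String × Int) :=
  match st with
  | (pos, digis, chars, out) =>
    let digis := if PySem.Chars.isdigit ele then digis ++ [ele] else digis
    let chars := if PySem.Chars.isdigit ele then chars else chars ++ [ele]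
    if chars ≠ [] ∧ chars.length % 2 = 0 then
      -- 'if digis: pos += int("".join(digis)); digis = []' (digis = [] also when it already was)
      let pos := if digis ≠ [] then pos + (PySem.Int.ofChars? digis).getD 0 else pos
      let pos := pos + 1
      match chars with
      | [c1, c2] => (pos, ([] : List Char), ([] : List Char),
                     out ++ [(String.ofList [c1], String.ofList [c2], pos)])
      | _ => (pos, ([] : List Char), ([] : List Char), out)  -- unreachable: chars has 2 elements here
    else
      (pos, digis, chars, out)

def mutations (btop : String) : List (String × String × Int) :=
  (btop.toList.foldl mutStep (0, [], [], [])).2.2.2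

-- ===== PORT B =====
-- Source B's split_one: leading digit run, first non-digit char, and the rest of the input
-- (none if all digits); Source B's suffix index j is represented by the remaining list itself
def splitOne (s : List Char) : Option (List Char × Char × List Char) :=
  match s with
  | [] => none
  | c :: rest =>
    if PySem.Chars.isdigit c then
      (splitOne rest).map (fun p => (c :: p.1, p.2.1, p.2.2))
    else
      some ([], c, rest)

theorem splitOne_lt {s : List Char} {d : List Char} {c : Char} {r : List Char}
    (h : splitOne s = some (d, c, r)) : r.length < s.length := by
  induction s generalizing d with
  | nil => simp [splitOne] at h
  | cons x xs ih =>
    by_cases hx : PySem.Chars.isdigit x = true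
    · cases hsp : splitOne xs with
      | none => simp [splitOne, hx, hsp] at h
      | some p =>
        obtain ⟨d', c', r'⟩ := p
        simp [splitOne, hx, hsp] at h
        obtain ⟨hd, hc, hr⟩ := h
        subst hc hr
        exact Nat.lt_trans (ih hsp) (Nat.lt_succ_self _)
    · simp [splitOne, hx] at h
      obtain ⟨hd, hc, hr⟩ := h
      subst hr
      simp

-- Source B's while-loop, on (remaining chars, pos)
def mutLoop (s : List Char) (pos : Int) : List (String × String × Int) :=
  match h1 : splitOne s with
  | none => []
  | some (d1, c1, s1) =>
    match h2 : splitOne s1 with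
    | none => []
    | some (d2, c2, s2) =>
      let num := d1 ++ d2
      let pos2 := pos + (if num ≠ [] then (PySem.Int.ofChars? num).getD 0 else 0) + 1
      (String.ofList [c1], String.ofList [c2], pos2) :: mutLoop s2 pos2
termination_by s.length
decreasing_by exact Nat.lt_trans (splitOne_lt h2) (splitOne_lt h1)

def mutations_alt (btop : String) : List (String × String × Int) :=
  mutLoop btop.toList 0

-- ===== PRECONDITION & SPEC =====
def Spec_mutations (btop : String) (out : List (String × String × Int)) : Prop := out = mutations_alt btop
instance (btop : String) (out : List (String × String × Int)) : Decidable (Spec_mutations btop out) := by unfold Spec_mutations; infer_instance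

-- ===== CLAIM (what is proved, stated in full; the proofs are below) =====
def Claim_equal_mutations : Prop := ∀ (btop : String), Dom_mutations btop → Spec_mutations btop (mutations btop)

-- ===== LEMMAS AND PROOFS =====

theorem splitOne_none {s : List Char} (h : splitOne s = none) :
    ∀ x ∈ s, PySem.Chars.isdigit x = true := by
  induction s with
  | nil => simp
  | cons c rest ih =>
    by_cases hc : PySem.Chars.isdigit c = true
    · simp [splitOne, hc] at h
      intro x hx
      rcases List.mem_cons.mp hx with rfl | hx
      · exact hc
      · exact ih h x hx
    · simp [splitOne, hc] at h

theorem splitOne_some {s d : List Char} {c : Char} {r : List Char}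
    (h : splitOne s = some (d, c, r)) :
    s = d ++ c :: r ∧ (∀ x ∈ d, PySem.Chars.isdigit x = true) ∧ PySem.Chars.isdigit c = false := by
  induction s generalizing d with
  | nil => simp [splitOne] at h
  | cons x xs ih =>
    by_cases hx : PySem.Chars.isdigit x = true
    · cases hsp : splitOne xs with
      | none => simp [splitOne, hx, hsp] at h
      | some p =>
        obtain ⟨d', c', r'⟩ := p
        simp [splitOne, hx, hsp] at h
        obtain ⟨hd, hc, hr⟩ := h
        subst hc hr
        obtain ⟨hs, hall, hcnd⟩ := ih hsp
        subst hd
        refine ⟨by simp [hs], ?_, hcnd⟩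
        intro y hy
        rcases List.mem_cons.mp hy with rfl | hy
        · exact hx
        · exact hall y hy
    · simp [splitOne, hx] at h
      obtain ⟨hd, hc, hr⟩ := h
      subst hd hc hr
      exact ⟨rfl, by simp, by simpa using hx⟩

-- fold over an all-digit run with chars = []: digits accumulate, nothing is yielded
theorem foldl_digits_nil (s : List Char) (hall : ∀ x ∈ s, PySem.Chars.isdigit x = true) :
    ∀ (pos : Int) (digis : List Char) (out : List (String × String × Int)),
      List.foldl mutStep (pos, digis, [], out) s = (pos, digis ++ s, [], out) := by
  induction s with
  | nil => intro pos digis out; simp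
  | cons c rest ih =>
    intro pos digis out
    have hc : PySem.Chars.isdigit c = true := hall c (by simp)
    have hrest : ∀ x ∈ rest, PySem.Chars.isdigit x = true := fun x hx => hall x (by simp [hx])
    simp only [List.foldl_cons, mutStep, hc]
    simp only [ite_true]
    rw [if_neg (by simp)]
    rw [ih hrest]
    simp

-- fold over an all-digit run with chars = [c1]: parity stays odd, nothing is yielded
theorem foldl_digits_one (s : List Char) (hall : ∀ x ∈ s, PySem.Chars.isdigit x = true) :
    ∀ (pos : Int) (digis : List Char) (c1 : Char) (out : List (String × String × Int)),
      List.foldl mutStep (pos, digis, [c1], out) s = (pos, digis ++ s, [c1], out) := by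
  induction s with
  | nil => intro pos digis c1 out; simp
  | cons c rest ih =>
    intro pos digis c1 out
    have hc : PySem.Chars.isdigit c = true := hall c (by simp)
    have hrest : ∀ x ∈ rest, PySem.Chars.isdigit x = true := fun x hx => hall x (by simp [hx])
    simp only [List.foldl_cons, mutStep, hc, ite_true]
    rw [if_neg (by simp)]
    rw [ih hrest]
    simp

-- a non-digit char arriving with chars = []: it is stored, nothing is yielded
theorem mutStep_char_nil (c : Char) (hc : PySem.Chars.isdigit c = false)
    (pos : Int) (digis : List Char) (out : List (String × String × Int)) :
    mutStep (pos, digis, [], out) c = (pos, digis, [c], out) := by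
  simp [mutStep, hc]

-- a non-digit char arriving with chars = [c1]: the pair is yielded and the state resets
theorem mutStep_char_one (c1 c2 : Char) (hc : PySem.Chars.isdigit c2 = false)
    (pos : Int) (digis : List Char) (out : List (String × String × Int)) :
    mutStep (pos, digis, [c1], out) c2 =
      ((if digis ≠ [] then pos + (PySem.Int.ofChars? digis).getD 0 else pos) + 1, [], [],
       out ++ [(String.ofList [c1], String.ofList [c2],
                (if digis ≠ [] then pos + (PySem.Int.ofChars? digis).getD 0 else pos) + 1)]) := by
  simp [mutStep, hc]

-- unfolding equation for mutLoop in the productive case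
theorem mutLoop_eq {s d1 : List Char} {c1 : Char} {s1 d2 : List Char} {c2 : Char} {s2 : List Char}
    (h1 : splitOne s = some (d1, c1, s1)) (h2 : splitOne s1 = some (d2, c2, s2)) (pos : Int) :
    mutLoop s pos =
      (String.ofList [c1], String.ofList [c2],
        pos + (if d1 ++ d2 ≠ [] then (PySem.Int.ofChars? (d1 ++ d2)).getD 0 else 0) + 1) ::
      mutLoop s2 (pos + (if d1 ++ d2 ≠ [] then (PySem.Int.ofChars? (d1 ++ d2)).getD 0 else 0) + 1) := by
  rw [mutLoop]
  split
  · next heq => rw [h1] at heq; cases heq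
  · next a b c heq =>
    rw [h1] at heq
    cases heq
    split
    · next heq2 => rw [h2] at heq2; cases heq2
    · next a2 b2 c2 heq2 =>
      rw [h2] at heq2
      cases heq2
      rfl

theorem mutLoop_none {s : List Char} (h1 : splitOne s = none) (pos : Int) : mutLoop s pos = [] := by
  rw [mutLoop]
  split
  · rfl
  · next a b c heq => rw [h1] at heq; cases heq

theorem mutLoop_none_snd {s d1 : List Char} {c1 : Char} {s1 : List Char}
    (h1 : splitOne s = some (d1, c1, s1)) (h2 : splitOne s1 = none) (pos : Int) :
    mutLoop s pos = [] := by
  rw [mutLoop]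
  split
  · rfl
  · next a b c heq =>
    rw [h1] at heq
    cases heq
    split
    · rfl
    · next a2 b2 c2 heq2 => rw [h2] at heq2; cases heq2

-- main invariant: from a round-start state, A's fold produces exactly B's loop output
theorem main_inv : ∀ (n : Nat) (s : List Char), s.length ≤ n →
    ∀ (pos : Int) (out : List (String × String × Int)),
      (List.foldl mutStep (pos, [], [], out) s).2.2.2 = out ++ mutLoop s pos := by
  intro n
  induction n with
  | zero =>
    intro s hs pos out
    have : s = [] := List.eq_nil_of_length_eq_zero (Nat.le_zero.mp hs)
    subst this
    rw [mutLoop_none (show splitOne [] = none from rfl)]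
    simp
  | succ n ih =>
    intro s hs pos out
    cases h1 : splitOne s with
    | none =>
      rw [foldl_digits_nil s (splitOne_none h1), mutLoop_none h1]
      simp
    | some p1 =>
      obtain ⟨d1, c1, s1⟩ := p1
      obtain ⟨hseq, hd1, hc1⟩ := splitOne_some h1
      cases h2 : splitOne s1 with
      | none =>
        rw [mutLoop_none_snd h1 h2, hseq]
        rw [List.foldl_append, foldl_digits_nil d1 hd1, List.foldl_cons,
            mutStep_char_nil c1 hc1, foldl_digits_one s1 (splitOne_none h2)]
        simp
      | some p2 =>
        obtain ⟨d2, c2, s2⟩ := p2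
        obtain ⟨hseq2, hd2, hc2⟩ := splitOne_some h2
        have hlen2 : s2.length ≤ n := by
          have l1 : s1.length < s.length := splitOne_lt h1
          have l2 : s2.length < s1.length := splitOne_lt h2
          omega
        rw [mutLoop_eq h1 h2, hseq]
        rw [List.foldl_append, foldl_digits_nil d1 hd1, List.foldl_cons,
            mutStep_char_nil c1 hc1, hseq2, List.foldl_append, foldl_digits_one d2 hd2,
            List.foldl_cons, mutStep_char_one c1 c2 hc2]
        rw [ih s2 hlen2]
        simp
        constructor
        · split <;> ring
        · congr 1
          split <;> ring

-- ===== VERDICT (by name: the statement is the Claim_ definition above) =====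
theorem mutations_spec : Claim_equal_mutations := by
  intro btop _
  unfold Spec_mutations mutations mutations_alt
  exact main_inv btop.toList.length btop.toList (Nat.le_refl _) 0 []
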